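-- pv_equiv track=rewrite | github.com/1ordhokage/GP_homework | 1-nearest-zero/main.py | dists_to_left_zero
-- ===== SOURCE A (Python) =====
-- def dists_to_left_zero(len_array: int, array: list[str]) -> list[int]:
--     """Function that counts distances from houses to the nearest left empty area.
--
--     Args:
--         len_array (int): Length of the given array.
--         array (list[str]): List of house numbers. Zero is for empty area.
--
--     Returns:
--         list[int]: Array of distances to the nearest left empty area.
--     """
--     dist_arr = []
--     curr_dist = len_array
--
--     for elem in array:
--         if elem == "0":
--             curr_dist = 0
--         else:
--             curr_dist += 1
--         dist_arr.append(curr_dist)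
--
--     return dist_arr
-- ===== SOURCE B (Python) =====
-- def dists_to_left_zero(len_array: int, array: list[str]) -> list[int]:
--     """Two staged passes: first collect the indices of all zeros, then emit
--     the answer as concatenated arithmetic runs (one run per inter-zero
--     segment): before the first zero the run starts at len_array + 1, after
--     each zero a fresh run 1, 2, ... up to the next zero."""
--     zeros = [i for i, elem in enumerate(array) if elem == "0"]
--     res = []
--     pos = 0
--     start = len_array + 1
--     for z in zeros:
--         res.extend(range(start, start + (z - pos)))
--         res.append(0)
--         pos = z + 1
--         start = 1
--     res.extend(range(start, start + (len(array) - pos)))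
--     return res
-- ===== Notes on version B (the rewrite author's own statement) =====
-- stated objective: alternative
-- what changed: B is a staged two-pass algorithm: it first collects the indices of all zeros, then builds the answer by concatenating whole arithmetic runs (range(...) per inter-zero segment, 0 at each zero), instead of A's element-by-element scan with a running reset/increment counter.
import Mathlib
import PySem

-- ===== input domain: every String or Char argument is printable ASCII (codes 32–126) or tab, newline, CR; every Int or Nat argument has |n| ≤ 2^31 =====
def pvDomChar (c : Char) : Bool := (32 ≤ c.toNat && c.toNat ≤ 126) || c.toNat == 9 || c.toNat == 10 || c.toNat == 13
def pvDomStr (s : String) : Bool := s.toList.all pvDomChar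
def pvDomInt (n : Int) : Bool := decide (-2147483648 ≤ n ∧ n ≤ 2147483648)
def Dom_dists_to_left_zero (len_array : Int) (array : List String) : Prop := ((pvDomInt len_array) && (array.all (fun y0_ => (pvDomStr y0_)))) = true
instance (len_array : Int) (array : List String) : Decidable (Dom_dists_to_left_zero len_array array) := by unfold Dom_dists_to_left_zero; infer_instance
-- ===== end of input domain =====

-- B replaces A's element-by-element reset/increment scan by a staged two-pass algorithm:
-- collect the zero indices first, then emit whole arithmetic runs per inter-zero segment.

-- ===== PORT A =====
-- loop over `array` carrying (dist_arr, curr_dist), appending the updated counter each step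
def distsAGo (xs : List String) (dist_arr : List Int) (curr_dist : Int) : List Int :=
  match xs with
  | [] => dist_arr
  | elem :: rest =>
      let c := if elem = "0" then 0 else curr_dist + 1
      distsAGo rest (dist_arr ++ [c]) c

def dists_to_left_zero (len_array : Int) (array : List String) : List Int :=
  distsAGo array [] len_array

-- ===== PORT B =====
-- pass 1: `[i for i, elem in enumerate(array) if elem == "0"]` (enumerate = index counter)
def zerosIdx (i : Nat) (xs : List String) : List Nat :=
  match xs with
  | [] => []
  | elem :: rest => if elem = "0" then i :: zerosIdx (i + 1) rest else zerosIdx (i + 1) rest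

-- pass 2: the `for z in zeros` loop carrying (res, pos, start)
def distsBLoop (zs : List Nat) (res : List Int) (pos : Nat) (start : Int) : List Int × Nat × Int :=
  match zs with
  | [] => (res, pos, start)
  | z :: rest =>
      distsBLoop rest (res ++ PySem.List.pyRange start (start + ((z : Int) - (pos : Int))) 1 ++ [0]) (z + 1) 1

def dists_to_left_zero_alt (len_array : Int) (array : List String) : List Int :=
  let zeros := zerosIdx 0 array
  let s := distsBLoop zeros [] 0 (len_array + 1)
  s.1 ++ PySem.List.pyRange s.2.2 (s.2.2 + ((array.length : Int) - (s.2.1 : Int))) 1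

-- ===== PRECONDITION & SPEC =====
def Spec_dists_to_left_zero (len_array : Int) (array : List String) (out : List Int) : Prop := out = dists_to_left_zero_alt len_array array
instance (len_array : Int) (array : List String) (out : List Int) : Decidable (Spec_dists_to_left_zero len_array array out) := by unfold Spec_dists_to_left_zero; infer_instance

-- ===== CLAIM (what is proved, stated in full; the proofs are below) =====
def Claim_equal_dists_to_left_zero : Prop := ∀ (len_array : Int) (array : List String), Dom_dists_to_left_zero len_array array → Spec_dists_to_left_zero len_array array (dists_to_left_zero len_array array)

-- ===== LEMMAS AND PROOFS =====

-- proof-only middle form: single pass emitting i - last_zero (0 at zeros)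
def spGo (i : Nat) (last : Int) (xs : List String) : List Int :=
  match xs with
  | [] => []
  | elem :: rest =>
      if elem = "0" then 0 :: spGo (i + 1) ((i : Int)) rest
      else ((i : Int) - last) :: spGo (i + 1) last rest

-- B's staged result for a suffix, as a function of the pending state
def bSeg (zs : List Nat) (pos : Nat) (start : Int) (N : Nat) : List Int :=
  let s := distsBLoop zs [] pos start
  s.1 ++ PySem.List.pyRange s.2.2 (s.2.2 + ((N : Int) - (s.2.1 : Int))) 1

theorem distsAGo_append (xs : List String) (acc : List Int) (curr : Int) :
    distsAGo xs acc curr = acc ++ distsAGo xs [] curr := by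
  induction xs generalizing acc curr with
  | nil => simp [distsAGo]
  | cons e rest ih =>
      simp only [distsAGo]
      rw [ih (acc ++ [_]), ih ([] ++ [_])]
      simp

theorem distsAGo_eq_spGo (xs : List String) (i : Nat) (last curr : Int)
    (h : curr = (i : Int) - last - 1) :
    distsAGo xs [] curr = spGo i last xs := by
  induction xs generalizing i last curr with
  | nil => simp [distsAGo, spGo]
  | cons e rest ih =>
      by_cases he : e = "0"
      · simp only [distsAGo, spGo, he, if_pos]
        rw [distsAGo_append]
        simp only [List.nil_append, List.singleton_append]
        exact congrArg (List.cons 0) (ih (i + 1) ((i : Int)) 0 (by push_cast; omega))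
      · simp only [distsAGo, spGo, if_neg he]
        rw [distsAGo_append]
        simp only [List.nil_append, List.singleton_append]
        have hc : curr + 1 = (i : Int) - last := by omega
        rw [hc]
        exact congrArg (List.cons _) (ih (i + 1) last _ (by push_cast; omega))

theorem distsBLoop_append (zs : List Nat) (res : List Int) (pos : Nat) (start : Int) :
    distsBLoop zs res pos start =
      (res ++ (distsBLoop zs [] pos start).1, (distsBLoop zs [] pos start).2) := by
  induction zs generalizing res pos start with
  | nil => simp [distsBLoop]
  | cons z rest ih =>
      simp only [distsBLoop]
      rw [ih (res ++ _ ++ [0]), ih ([] ++ _ ++ [0])]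
      simp

theorem zerosIdx_ge (xs : List String) (i : Nat) (z : Nat) (hz : z ∈ zerosIdx i xs) : i ≤ z := by
  induction xs generalizing i with
  | nil => simp [zerosIdx] at hz
  | cons e rest ih =>
      simp only [zerosIdx] at hz
      split at hz
      · rcases List.mem_cons.mp hz with h | h
        · omega
        · have := ih (i + 1) h; omega
      · have := ih (i + 1) hz; omega

-- shifting the segment start past one non-zero element peels off `start`
theorem bSeg_shift (zs : List Nat) (pos : Nat) (start : Int) (N : Nat)
    (hzs : ∀ z ∈ zs, pos + 1 ≤ z) (hN : pos < N) :
    bSeg zs pos start N = start :: bSeg zs (pos + 1) (start + 1) N := by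
  cases zs with
  | nil =>
      simp only [bSeg, distsBLoop, List.nil_append]
      rw [PySem.List.pyRange_one_cons (by omega)]
      congr 1
      congr 1
      push_cast; ring
  | cons z rest =>
      have hz : pos + 1 ≤ z := hzs z (List.mem_cons_self ..)
      simp only [bSeg, distsBLoop]
      rw [distsBLoop_append rest (([] : List Int) ++ _ ++ [0])]
      rw [distsBLoop_append rest (([] : List Int) ++ PySem.List.pyRange (start+1) _ 1 ++ [0])]
      simp only [List.nil_append]
      rw [PySem.List.pyRange_one_cons (by omega)]
      have : start + ((z : Int) - (pos : Int)) = (start + 1) + ((z : Int) - ((pos : Nat) + 1 : Nat)) := by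
        push_cast; ring
      rw [this]
      simp

theorem bSeg_eq_spGo (xs : List String) (pos : Nat) (start last : Int)
    (h : start = (pos : Int) - last) :
    bSeg (zerosIdx pos xs) pos start (pos + xs.length) = spGo pos last xs := by
  induction xs generalizing pos start last with
  | nil =>
      simp only [zerosIdx, bSeg, distsBLoop, spGo, List.nil_append, List.length_nil, Nat.add_zero]
      rw [PySem.List.pyRange_one_eq_nil (by omega)]
  | cons e rest ih =>
      by_cases he : e = "0"
      · simp only [zerosIdx, spGo, he, if_pos]
        simp only [bSeg, distsBLoop]
        rw [distsBLoop_append (zerosIdx (pos + 1) rest) (([] : List Int) ++ _ ++ [0])]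
        simp only [List.nil_append, Int.sub_self, Int.add_zero]
        rw [PySem.List.pyRange_one_eq_nil (by omega)]
        simp only [List.nil_append, List.cons_append]
        have := ih (pos + 1) 1 ((pos : Int)) (by push_cast; ring)
        simp only [bSeg] at this
        rw [List.length_cons]
        have harr : pos + (rest.length + 1) = (pos + 1) + rest.length := by omega
        rw [harr, this]
      · simp only [zerosIdx, spGo, if_neg he]
        rw [List.length_cons]
        have harr : pos + (rest.length + 1) = (pos + 1) + rest.length := by omega
        rw [harr]
        rw [bSeg_shift _ _ _ _ (fun z hz => zerosIdx_ge rest (pos + 1) z hz) (by omega)]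
        rw [ih (pos + 1) (start + 1) last (by push_cast; omega), h]

-- ===== VERDICT (by name: the statement is the Claim_ definition above) =====
theorem dists_to_left_zero_spec : Claim_equal_dists_to_left_zero := by
  intro len_array array _
  unfold Spec_dists_to_left_zero dists_to_left_zero dists_to_left_zero_alt
  have hB := bSeg_eq_spGo array 0 (len_array + 1) (-len_array - 1) (by push_cast; ring)
  simp only [bSeg, Nat.zero_add] at hB
  rw [hB]
  exact distsAGo_eq_spGo array 0 (-len_array - 1) len_array (by push_cast; ring)
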